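-- pv_equiv track=rewrite | github.com/LeonidSenin/Flask_parser | data_research_keywords.py | get_phrase_frequency
-- ===== SOURCE A (Python) =====
-- from collections import Counter
--
-- def get_phrase_frequency(text, phrases):
--     # Разбиение текста на слова
--     words = text.split()
--
--     # Подсчет частоты встречаемости фраз в тексте
--     phrase_counter = Counter()
--     for phrase in phrases:
--         phrase_words = phrase.split()
--         phrase_length = len(phrase_words)
--
--         for i in range(len(words) - phrase_length + 1):
--             if words[i:i + phrase_length] == phrase_words:
--                 phrase_counter[phrase] += 1
--
--     return phrase_counter
-- ===== SOURCE B (Python) =====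
-- from collections import Counter
--
-- def get_phrase_frequency(text, phrases):
--     words = text.split()
--     n = len(words)
--     ngram_counts = {}  # phrase length -> Counter of all n-grams of that length (built once per distinct length)
--     result = Counter()
--     for phrase in phrases:
--         pw = tuple(phrase.split())
--         k = len(pw)
--         if k not in ngram_counts:
--             ngram_counts[k] = Counter(tuple(words[i:i + k]) for i in range(n - k + 1))
--         c = ngram_counts[k][pw]
--         if c:
--             result[phrase] += c
--     return result
-- ===== Notes on version B (the rewrite author's own statement) =====
-- stated objective: alternative
-- what changed: Instead of scanning every text position for every phrase, B builds one Counter of n-gram tuples per distinct phrase length (cached in a dict) and answers each phrase by a single Counter lookup; it trades the per-phrase scan for a per-length precomputation.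
import Mathlib
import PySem

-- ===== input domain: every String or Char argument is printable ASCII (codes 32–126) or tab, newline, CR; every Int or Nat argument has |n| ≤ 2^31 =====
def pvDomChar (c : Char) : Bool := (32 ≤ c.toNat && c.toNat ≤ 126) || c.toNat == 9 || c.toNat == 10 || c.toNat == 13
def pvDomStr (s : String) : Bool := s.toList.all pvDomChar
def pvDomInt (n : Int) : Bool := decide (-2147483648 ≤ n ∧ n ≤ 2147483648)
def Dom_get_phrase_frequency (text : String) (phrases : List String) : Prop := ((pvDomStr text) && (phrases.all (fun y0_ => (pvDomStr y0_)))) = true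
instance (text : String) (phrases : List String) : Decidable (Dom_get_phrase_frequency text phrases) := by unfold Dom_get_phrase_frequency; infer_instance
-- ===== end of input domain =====

-- B replaces A's per-phrase scan over all text positions by one n-gram Counter per distinct
-- phrase length, built once and looked up per phrase (objective: alternative algorithm).

-- ===== PORT A =====
def get_phrase_frequency (text : String) (phrases : List String) : List (String × Int) :=
  let words := PySem.Str.split₀ text
  (phrases.foldl (fun (phrase_counter : PySem.Dict String Int) phrase =>
      let phrase_words := PySem.Str.split₀ phrase
      let phrase_length : Int := phrase_words.length
      (PySem.List.pyRange 0 ((words.length : Int) - phrase_length + 1) 1).foldl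
        (fun pc i =>
          if PySem.List.slice words (some i) (some (i + phrase_length)) == phrase_words then
            pc.modify phrase 0 (· + 1)
          else pc) phrase_counter)
    PySem.Dict.empty).items

-- ===== PORT B =====
def get_phrase_frequency_alt (text : String) (phrases : List String) : List (String × Int) :=
  let words := PySem.Str.split₀ text
  let n : Int := words.length
  (phrases.foldl (fun (st : PySem.Dict Int (PySem.Dict (List String) Int) × PySem.Dict String Int) phrase =>
      let pw := PySem.Str.split₀ phrase
      let k : Int := pw.length
      let ngc := if st.1.contains k then st.1 else
        st.1.insert k (PySem.Dict.counter
          ((PySem.List.pyRange 0 (n - k + 1) 1).map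
            (fun i => PySem.List.slice words (some i) (some (i + k)))))
      let c := (ngc.getD k PySem.Dict.empty).getD pw 0
      (ngc, if c ≠ 0 then st.2.modify phrase 0 (· + c) else st.2))
    (PySem.Dict.empty, PySem.Dict.empty)).2.items

-- ===== PRECONDITION & SPEC =====
def Spec_get_phrase_frequency (text : String) (phrases : List String) (out : List (String × Int)) : Prop := out = get_phrase_frequency_alt text phrases
instance (text : String) (phrases : List String) (out : List (String × Int)) : Decidable (Spec_get_phrase_frequency text phrases out) := by unfold Spec_get_phrase_frequency; infer_instance

-- ===== CLAIM (what is proved, stated in full; the proofs are below) =====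
def Claim_equal_get_phrase_frequency : Prop := ∀ (text : String) (phrases : List String), Dom_get_phrase_frequency text phrases → Spec_get_phrase_frequency text phrases (get_phrase_frequency text phrases)

-- ===== LEMMAS AND PROOFS =====

-- the list of all k-grams of `words`, exactly as B builds it
def pvNgrams (words : List String) (k : Int) : List (List String) :=
  (PySem.List.pyRange 0 ((words.length : Int) - k + 1) 1).map
    (fun i => PySem.List.slice words (some i) (some (i + k)))

-- invariant on B's length→Counter cache: every stored entry is the Counter of the k-grams
def pvGood (words : List String) (ngc : PySem.Dict Int (PySem.Dict (List String) Int)) : Prop :=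
  ∀ k, ngc.get? k = none ∨ ngc.get? k = some (PySem.Dict.counter (pvNgrams words k))

-- two Counter increments at the same key fuse
theorem pv_modify_add (d : PySem.Dict String Int) (k : String) (a b : Int) :
    (d.modify k 0 (· + a)).modify k 0 (· + b) = d.modify k 0 (· + (a + b)) := by
  simp [PySem.Dict.modify, PySem.Dict.insert_insert_self, PySem.Dict.getD_insert_self, add_assoc]

-- A's inner scan over the positions equals one fused increment by the number of matches
theorem pv_loopA (phrase : String) (p : Int → Bool) :
    ∀ (L : List Int) (d : PySem.Dict String Int),
      L.foldl (fun pc i => if p i then pc.modify phrase 0 (· + 1) else pc) d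
        = if (L.countP p : Int) = 0 then d else d.modify phrase 0 (· + (L.countP p : Int)) := by
  intro L
  induction L with
  | nil => intro d; simp
  | cons i L ih =>
    intro d
    by_cases hp : p i
    · simp only [List.foldl_cons, hp, if_true, ih, List.countP_cons, if_true]
      by_cases h0 : (L.countP p : Int) = 0
      · have : L.countP p = 0 := by exact_mod_cast h0
        simp [this]
      · rw [if_neg h0, if_neg (by push_cast; omega), pv_modify_add]
        norm_num [add_comm]
    · simp [List.foldl_cons, hp, ih]

-- the number of matches of A's scan is the Counter value B looks up
theorem pv_count_eq (words pw : List String) (k : Int) :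
    ((PySem.List.pyRange 0 ((words.length : Int) - k + 1) 1).countP
        (fun i => PySem.List.slice words (some i) (some (i + k)) == pw) : Int)
      = (PySem.Dict.counter (pvNgrams words k)).getD pw 0 := by
  rw [PySem.Dict.getD_counter, pvNgrams, List.count_eq_countP, List.countP_map]
  rfl

-- the cache step: after B's conditional insert, the entry at k is the k-gram Counter,
-- and the invariant is preserved
theorem pv_cache_step (words : List String) (ngc : PySem.Dict Int (PySem.Dict (List String) Int))
    (k : Int) (h : pvGood words ngc) :
    (let ngc' := if ngc.contains k then ngc else ngc.insert k (PySem.Dict.counter (pvNgrams words k))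
     ngc'.getD k PySem.Dict.empty = PySem.Dict.counter (pvNgrams words k) ∧ pvGood words ngc') := by
  by_cases hc : ngc.contains k
  · refine ⟨?_, by simpa [hc] using h⟩
    have hc' := hc
    rw [PySem.Dict.contains_eq_isSome_get?] at hc'
    rcases h k with h0 | h1
    · rw [h0] at hc'; simp at hc'
    · simp [hc, PySem.Dict.getD_eq_get?_getD, h1]
  · refine ⟨by simp [hc, PySem.Dict.getD_insert_self], ?_⟩
    intro k'
    simp only [hc, Bool.false_eq_true, ite_false]
    rw [PySem.Dict.get?_insert]
    by_cases hk' : k' = k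
    · subst hk'; simp
    · simp [hk']; exact h k'

-- main loop correspondence: A's fold and the result component of B's fold agree
theorem pv_main (words : List String) :
    ∀ (ps : List String) (ngc : PySem.Dict Int (PySem.Dict (List String) Int))
      (d : PySem.Dict String Int), pvGood words ngc →
      ps.foldl (fun (phrase_counter : PySem.Dict String Int) phrase =>
          let phrase_words := PySem.Str.split₀ phrase
          let phrase_length : Int := phrase_words.length
          (PySem.List.pyRange 0 ((words.length : Int) - phrase_length + 1) 1).foldl
            (fun pc i =>
              if PySem.List.slice words (some i) (some (i + phrase_length)) == phrase_words then
                pc.modify phrase 0 (· + 1)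
              else pc) phrase_counter) d
      = (ps.foldl (fun (st : PySem.Dict Int (PySem.Dict (List String) Int) × PySem.Dict String Int) phrase =>
          let pw := PySem.Str.split₀ phrase
          let k : Int := pw.length
          let ngc := if st.1.contains k then st.1 else
            st.1.insert k (PySem.Dict.counter
              ((PySem.List.pyRange 0 ((words.length : Int) - k + 1) 1).map
                (fun i => PySem.List.slice words (some i) (some (i + k)))))
          let c := (ngc.getD k PySem.Dict.empty).getD pw 0
          (ngc, if c ≠ 0 then st.2.modify phrase 0 (· + c) else st.2)) (ngc, d)).2 := by
  intro ps
  induction ps with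
  | nil => intro ngc d _; simp
  | cons phrase ps ih =>
    intro ngc d hg
    simp only [List.foldl_cons]
    obtain ⟨hget, hg'⟩ := pv_cache_step words ngc ((PySem.Str.split₀ phrase).length : Int) hg
    rw [pv_loopA, pv_count_eq words (PySem.Str.split₀ phrase) _, ih _ _ hg']
    show _ = (_ : _ × PySem.Dict String Int).2
    rw [show ((PySem.List.pyRange 0 ((words.length : Int) - ((PySem.Str.split₀ phrase).length : Int) + 1) 1).map
        (fun i => PySem.List.slice words (some i) (some (i + ((PySem.Str.split₀ phrase).length : Int)))))
      = pvNgrams words ((PySem.Str.split₀ phrase).length : Int) from rfl, hget]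
    congr 1
    by_cases h0 : (PySem.Dict.counter (pvNgrams words ((PySem.Str.split₀ phrase).length : Int))).getD (PySem.Str.split₀ phrase) 0 = 0
    · simp [h0]
    · simp only [h0, ite_not]

-- ===== VERDICT (by name: the statement is the Claim_ definition above) =====
theorem get_phrase_frequency_spec : Claim_equal_get_phrase_frequency := by
  intro text phrases _
  unfold Spec_get_phrase_frequency get_phrase_frequency get_phrase_frequency_alt
  dsimp only
  rw [pv_main (PySem.Str.split₀ text) phrases PySem.Dict.empty PySem.Dict.empty
    (by intro k; left; simp [PySem.Dict.get?_empty])]
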